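-- pv_equiv track=rewrite | github.com/yang478/auditable-knowledge-packs | pack-builder/scripts/build_skill_lib/references.py | _outline_parent_addrs
-- ===== SOURCE A (Python) =====
-- from typing import Any, Dict, List, Optional, Sequence, Tuple
--
-- def _outline_parent_addrs(addr: str) -> List[str]:
--     parts = [p for p in addr.split(".") if p]
--     if len(parts) <= 1:
--         return []
--     out: List[str] = []
--     for i in range(1, len(parts)):
--         out.append(".".join(parts[:i]))
--     return out
-- ===== SOURCE B (Python) =====
-- from typing import List
--
--
-- def _outline_parent_addrs(addr: str) -> List[str]:
--     parts = [p for p in addr.split(".") if p]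
--     if len(parts) <= 1:
--         return []
--     out: List[str] = []
--     acc = parts[0]
--     for p in parts[1:]:
--         out.append(acc)
--         acc = acc + "." + p
--     return out
-- ===== Notes on version B (the rewrite author's own statement) =====
-- stated objective: alternative
-- what changed: Replaces the index loop that reslices parts[:i] and re-joins each prefix from scratch with a single scan over the parts carrying a running prefix string, appending the accumulator before each extension.
import Mathlib
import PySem

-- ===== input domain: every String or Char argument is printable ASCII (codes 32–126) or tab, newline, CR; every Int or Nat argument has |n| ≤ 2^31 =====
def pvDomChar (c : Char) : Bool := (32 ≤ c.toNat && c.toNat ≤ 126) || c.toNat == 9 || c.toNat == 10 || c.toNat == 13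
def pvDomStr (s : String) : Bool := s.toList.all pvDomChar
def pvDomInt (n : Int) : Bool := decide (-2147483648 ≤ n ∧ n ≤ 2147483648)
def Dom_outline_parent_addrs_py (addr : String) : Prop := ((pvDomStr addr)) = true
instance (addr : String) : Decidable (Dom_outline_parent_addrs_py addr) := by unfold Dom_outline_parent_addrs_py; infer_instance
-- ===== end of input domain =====

-- B replaces A's index loop that reslices parts[:i] and re-joins every prefix by a single
-- scan over the parts carrying a running prefix string (objective: alternative decomposition).

-- ===== PORT A =====
def outline_parent_addrs_py (addr : String) : List String :=
  -- parts = [p for p in addr.split(".") if p]  (sep "." is nonempty, so split? is always `some`)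
  let parts := ((PySem.Str.split? addr ".").getD []).filter (fun p => p ≠ "")
  if parts.length ≤ 1 then []
  else
    -- for i in range(1, len(parts)): out.append(".".join(parts[:i]))
    (PySem.List.pyRange 1 parts.length).foldl
      (fun out i => out ++ [PySem.Str.join "." (PySem.List.slice parts none (some i))]) []

-- ===== PORT B =====
def outline_parent_addrs_py_alt (addr : String) : List String :=
  -- parts = [p for p in addr.split(".") if p]
  let parts := ((PySem.Str.split? addr ".").getD []).filter (fun p => p ≠ "")
  if parts.length ≤ 1 then []
  else
    match parts with
    | [] => []  -- unreachable: parts.length > 1 here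
    | p0 :: rest =>
      -- acc = parts[0]; for p in parts[1:]: out.append(acc); acc = acc + "." + p
      (rest.foldl (fun (st : List String × String) p => (st.1 ++ [st.2], st.2 ++ "." ++ p))
        ([], p0)).1

-- ===== PRECONDITION & SPEC =====
def Spec_outline_parent_addrs_py (addr : String) (out : List String) : Prop := out = outline_parent_addrs_py_alt addr
instance (addr : String) (out : List String) : Decidable (Spec_outline_parent_addrs_py addr out) := by unfold Spec_outline_parent_addrs_py; infer_instance

-- ===== CLAIM (what is proved, stated in full; the proofs are below) =====
def Claim_equal_outline_parent_addrs_py : Prop := ∀ (addr : String), Dom_outline_parent_addrs_py addr → Spec_outline_parent_addrs_py addr (outline_parent_addrs_py addr)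

-- ===== LEMMAS AND PROOFS =====

-- running-prefix fold used to characterise B's accumulator
def dotFold (acc : String) (xs : List String) : String :=
  xs.foldl (fun a p => a ++ "." ++ p) acc

theorem pyRange_eq_map (m : Nat) : ∀ a : Int,
    PySem.List.pyRange a (a + m) = (List.range m).map (fun j : Nat => a + (j : Int)) := by
  induction m with
  | zero => intro a; simp
  | succ m ih =>
    intro a
    rw [show (a + ((m + 1 : Nat) : Int)) = (a + 1) + (m : Int) by push_cast; ring,
      PySem.List.pyRange_one_cons (by omega), ih (a + 1)]
    have h : ∀ j : Nat, (a + 1) + (j : Int) = a + ((j + 1 : Nat) : Int) := by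
      intro j; push_cast; ring
    simp [List.range_succ_eq_map, List.map_map, Function.comp_def, h]

theorem foldl_append_map {α β : Type} (f : α → β) (l : List α) : ∀ init : List β,
    l.foldl (fun out i => out ++ [f i]) init = init ++ l.map f := by
  induction l with
  | nil => intro init; simp
  | cons x l ih => intro init; simp [ih]

theorem append_dotFold (xs : List String) : ∀ s t : String,
    s ++ dotFold t xs = dotFold (s ++ t) xs := by
  induction xs with
  | nil => intro s t; rfl
  | cons r xs ih =>
    intro s t
    simp only [dotFold, List.foldl_cons] at *
    rw [ih s (t ++ "." ++ r), ← String.append_assoc, ← String.append_assoc]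

theorem join_cons_fold (xs : List String) : ∀ p0 : String,
    PySem.Str.join "." (p0 :: xs) = dotFold p0 xs := by
  induction xs with
  | nil =>
    intro p0
    apply String.toList_inj.mp
    simp [PySem.Str.toList_join, PySem.Chars.join_singleton, dotFold]
  | cons q xs ih =>
    intro p0
    have hcc : PySem.Str.join "." (p0 :: q :: xs) = p0 ++ "." ++ PySem.Str.join "." (q :: xs) := by
      apply String.toList_inj.mp
      simp [PySem.Str.toList_join, PySem.Chars.join_cons_cons, String.toList_append]
    rw [hcc, ih q, append_dotFold xs (p0 ++ ".") q]
    simp only [dotFold, List.foldl_cons]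

theorem scan_fst (rest : List String) : ∀ (out : List String) (acc : String),
    (rest.foldl (fun (st : List String × String) p => (st.1 ++ [st.2], st.2 ++ "." ++ p))
        (out, acc)).1
      = out ++ (List.range rest.length).map (fun j => dotFold acc (rest.take j)) := by
  induction rest with
  | nil => intro out acc; simp
  | cons p rest ih =>
    intro out acc
    simp [List.foldl_cons, ih, List.range_succ_eq_map, List.map_map, Function.comp_def,
      dotFold]

theorem core_eq (parts : List String) :
    (if parts.length ≤ 1 then []
     else (PySem.List.pyRange 1 parts.length).foldl
       (fun out i => out ++ [PySem.Str.join "." (PySem.List.slice parts none (some i))]) [])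
    = (if parts.length ≤ 1 then ([] : List String)
       else match parts with
       | [] => []
       | p0 :: rest =>
         (rest.foldl (fun (st : List String × String) p => (st.1 ++ [st.2], st.2 ++ "." ++ p))
           ([], p0)).1) := by
  by_cases h : parts.length ≤ 1
  · simp [h]
  · simp only [h, if_false]
    match parts with
    | [] => simp at h
    | p0 :: rest =>
      have hB : (match p0 :: rest with
          | [] => ([] : List String)
          | p0 :: rest =>
            (rest.foldl (fun (st : List String × String) p => (st.1 ++ [st.2], st.2 ++ "." ++ p))
              ([], p0)).1)
          = (rest.foldl (fun (st : List String × String) p => (st.1 ++ [st.2], st.2 ++ "." ++ p))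
              ([], p0)).1 := rfl
      rw [hB, scan_fst rest [] p0]
      have hr : ((p0 :: rest).length : Int) = 1 + (rest.length : Int) := by
        simp [List.length_cons]; ring
      rw [hr, pyRange_eq_map rest.length 1, foldl_append_map]
      rw [List.map_map, List.nil_append]
      apply List.map_congr_left
      intro j _
      have hs : PySem.List.slice (p0 :: rest) none (some (1 + (j : Int))) = (p0 :: rest).take (j + 1) := by
        rw [PySem.List.slice_to _ (by omega)]
        congr 1
        omega
      simp only [Function.comp_def, hs, List.take_succ_cons, join_cons_fold]

-- ===== VERDICT (by name: the statement is the Claim_ definition above) =====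
theorem outline_parent_addrs_py_spec : Claim_equal_outline_parent_addrs_py := by
  intro addr _
  unfold Spec_outline_parent_addrs_py outline_parent_addrs_py outline_parent_addrs_py_alt
  exact core_eq _
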